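-- pv_equiv track=rewrite | github.com/Moneymet/Advent_of_Code | Day_5_2.py | find_value_from_binary_string
-- ===== SOURCE A (Python) =====
-- def find_value_from_binary_string(letters, letter_1, letter_0):
--     value = 0
--     for x in letters:
--         value = value << 1
--         if x == letter_1:
--             value += 1
--         elif x != letter_0:
--             return -1
--     return value
-- ===== SOURCE B (Python) =====
-- def find_value_from_binary_string(letters, letter_1, letter_0):
--     bits = []
--     for x in letters:
--         if x == letter_1:
--             bits.append('1')
--         elif x == letter_0:
--             bits.append('0')
--         else:
--             return -1
--     return int(''.join(bits), 2) if bits else 0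
-- ===== Notes on version B (the rewrite author's own statement) =====
-- stated objective: idiomatic
-- what changed: Instead of maintaining a running shifted accumulator, B collects a standard '0'/'1' digit string in one pass and converts it with int(s, 2) at the end (0 for empty input, -1 on the first invalid symbol).
import Mathlib
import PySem

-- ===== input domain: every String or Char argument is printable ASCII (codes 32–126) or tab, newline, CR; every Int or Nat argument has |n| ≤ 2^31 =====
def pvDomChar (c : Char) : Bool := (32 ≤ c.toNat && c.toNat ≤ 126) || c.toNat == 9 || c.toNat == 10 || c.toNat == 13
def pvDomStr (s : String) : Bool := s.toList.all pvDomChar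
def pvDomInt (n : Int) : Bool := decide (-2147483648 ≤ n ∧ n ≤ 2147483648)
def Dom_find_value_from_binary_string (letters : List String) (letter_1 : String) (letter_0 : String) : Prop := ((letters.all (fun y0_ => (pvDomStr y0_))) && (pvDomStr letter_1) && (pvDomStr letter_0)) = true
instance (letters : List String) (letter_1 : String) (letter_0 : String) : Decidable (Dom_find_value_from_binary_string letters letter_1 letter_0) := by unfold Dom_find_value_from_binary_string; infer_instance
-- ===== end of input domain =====

-- B builds a standard binary digit string in one pass and converts it once at the end (idiomatic decomposition; same O(n) cost).


-- ===== PORT A =====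
-- A's loop: shift the accumulator, add 1 / keep / return -1 per symbol.
def pvGoA (letter_1 letter_0 : String) : List String → Int → Int
  | [], value => value
  | x :: xs, value =>
    let value := value <<< (1:Nat)
    if x == letter_1 then pvGoA letter_1 letter_0 xs (value + 1)
    else if x != letter_0 then -1
    else pvGoA letter_1 letter_0 xs value

def find_value_from_binary_string (letters : List String) (letter_1 : String) (letter_0 : String) : Int :=
  pvGoA letter_1 letter_0 letters 0

-- ===== PORT B =====
-- B: collect a '0'/'1' digit list (none on the first invalid symbol) …
def pvBitsB (letter_1 letter_0 : String) : List String → Option (List Char)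
  | [] => some []
  | x :: xs =>
    if x == letter_1 then (pvBitsB letter_1 letter_0 xs).map (fun bs => '1' :: bs)
    else if x == letter_0 then (pvBitsB letter_1 letter_0 xs).map (fun bs => '0' :: bs)
    else none

-- … then int(s, 2) on the joined digits (exact for '0'/'1' strings)
def pvInt2 (bs : List Char) : Int :=
  bs.foldl (fun a c => 2 * a + (if c == '1' then 1 else 0)) 0

def find_value_from_binary_string_alt (letters : List String) (letter_1 : String) (letter_0 : String) : Int :=
  match pvBitsB letter_1 letter_0 letters with
  | none => -1
  | some [] => 0
  | some bs => pvInt2 bs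

-- ===== PRECONDITION & SPEC =====
def Spec_find_value_from_binary_string (letters : List String) (letter_1 : String) (letter_0 : String) (out : Int) : Prop := out = find_value_from_binary_string_alt letters letter_1 letter_0
instance (letters : List String) (letter_1 : String) (letter_0 : String) (out : Int) : Decidable (Spec_find_value_from_binary_string letters letter_1 letter_0 out) := by unfold Spec_find_value_from_binary_string; infer_instance

-- ===== CLAIM (what is proved, stated in full; the proofs are below) =====
def Claim_equal_find_value_from_binary_string : Prop := ∀ (letters : List String) (letter_1 : String) (letter_0 : String), Dom_find_value_from_binary_string letters letter_1 letter_0 → Spec_find_value_from_binary_string letters letter_1 letter_0 (find_value_from_binary_string letters letter_1 letter_0)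

-- ===== LEMMAS AND PROOFS =====
lemma pvGoA_eq (letter_1 letter_0 : String) (xs : List String) (v : Int) :
    pvGoA letter_1 letter_0 xs v
      = match pvBitsB letter_1 letter_0 xs with
        | none => -1
        | some bs => bs.foldl (fun a c => 2 * a + (if c == '1' then 1 else 0)) v := by
  induction xs generalizing v with
  | nil => rfl
  | cons x xs ih =>
    have hs : ∀ w : Int, w <<< (1:Nat) = 2 * w := fun w => by
      rw [Int.shiftLeft_eq]; ring
    by_cases h1 : x == letter_1
    · simp [pvGoA, pvBitsB, h1, ih, hs]
      cases pvBitsB letter_1 letter_0 xs <;> simp [List.foldl] <;> ring_nf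
    · by_cases h0 : x == letter_0
      · simp [pvGoA, pvBitsB, h1, h0, ih, hs]
        cases pvBitsB letter_1 letter_0 xs <;> simp [List.foldl] <;>
          exact fun h => absurd (by simpa using h0) h
      · simp [pvGoA, pvBitsB, h1, h0]
        intro h; exact absurd h (by simpa using h0)

-- ===== VERDICT (by name: the statement is the Claim_ definition above) =====
theorem find_value_from_binary_string_spec : Claim_equal_find_value_from_binary_string := by
  intro letters letter_1 letter_0 _
  unfold Spec_find_value_from_binary_string find_value_from_binary_string find_value_from_binary_string_alt
  rw [pvGoA_eq]
  cases h : pvBitsB letter_1 letter_0 letters with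
  | none => rfl
  | some bs => cases bs <;> rfl
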